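-- pv_equiv track=rewrite | github.com/Hansimov/bili-search | converters/dsl/fields/qmod.py | parse_qmod_str
-- ===== SOURCE A (Python) =====
-- QMOD = ["word", "vector"]
--
-- QMOD_CHAR_MAP = {
--     "w": "word",
--     "v": "vector",
--     "r": "rerank",
-- }
--
-- def parse_qmod_str(mode_str: str) -> list[str]:
--     """Parse qmod string into list of mode names.
--
--     Args:
--         mode_str: Raw mode string like "w", "v", "wv", "vw", "wr", "vr", "wvr".
--
--     Returns:
--         List of mode names like ["word"], ["vector"], ["word", "vector"], ["word", "rerank"].
--         Always in canonical order: word, vector, rerank.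
--         Returns default (["word", "vector"]) if no valid retrieval mode is specified.
--     """
--     mode_str = mode_str.lower().strip()
--     modes = set()
--
--     for char in mode_str:
--         if char in QMOD_CHAR_MAP:
--             mode_name = QMOD_CHAR_MAP[char]
--             modes.add(mode_name)
--
--     # Validate: must have at least 'w' or 'v' for retrieval
--     has_retrieval = "word" in modes or "vector" in modes
--     if not has_retrieval:
--         return QMOD.copy()
--
--     # Return in canonical order: word, vector, rerank
--     canonical_order = ["word", "vector", "rerank"]
--     return [m for m in canonical_order if m in modes]
-- ===== SOURCE B (Python) =====
-- QMOD = ["word", "vector"]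
--
-- QMOD_TABLE = [("w", "word"), ("v", "vector"), ("r", "rerank")]
--
-- def parse_qmod_str(mode_str: str) -> list[str]:
--     """Loop once over the fixed ordered mode table, probing the string."""
--     s = mode_str.lower().strip()
--     result = [name for ch, name in QMOD_TABLE if ch in s]
--     if "word" not in result and "vector" not in result:
--         return QMOD.copy()
--     return result
-- ===== Notes on version B (the rewrite author's own statement) =====
-- stated objective: simpler
-- what changed: B iterates once over the fixed ordered table [('w','word'),('v','vector'),('r','rerank')] probing the lowered/stripped string for each mode char, instead of scanning every input character into a set and then re-filtering a canonical-order list; the set and the second pass disappear, and the per-character Python loop with dict lookups is replaced by three C-level substring probes.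
import Mathlib
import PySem

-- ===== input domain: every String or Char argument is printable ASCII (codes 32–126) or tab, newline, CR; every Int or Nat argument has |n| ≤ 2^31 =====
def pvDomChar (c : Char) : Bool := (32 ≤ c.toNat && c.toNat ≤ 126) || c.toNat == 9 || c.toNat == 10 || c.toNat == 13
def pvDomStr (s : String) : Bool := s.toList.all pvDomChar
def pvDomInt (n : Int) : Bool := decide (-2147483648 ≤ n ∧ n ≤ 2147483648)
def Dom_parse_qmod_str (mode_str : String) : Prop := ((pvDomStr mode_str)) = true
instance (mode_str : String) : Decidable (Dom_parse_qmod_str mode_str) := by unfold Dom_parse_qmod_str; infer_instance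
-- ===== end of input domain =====

-- B replaces A's char-scan-into-a-set plus canonical-order re-filter by a single loop
-- over the fixed ordered mode table probing the string (objective: simpler).

-- ===== PORT A =====
def QMOD : List String := ["word", "vector"]

def QMOD_CHAR_MAP : PySem.Dict Char String :=
  PySem.Dict.ofList [('w', "word"), ('v', "vector"), ('r', "rerank")]

def parse_qmod_str (mode_str : String) : List String :=
  let s := PySem.Str.strip (PySem.Str.lower mode_str)
  let modes : PySem.Set String :=
    s.toList.foldl
      (fun m c =>
        match PySem.Dict.get? QMOD_CHAR_MAP c with
        | some mode_name => PySem.Set.add m mode_name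
        | none => m)
      PySem.Set.empty
  let has_retrieval := PySem.Set.contains modes "word" || PySem.Set.contains modes "vector"
  if !has_retrieval then QMOD
  else ["word", "vector", "rerank"].filter (fun m => PySem.Set.contains modes m)

-- ===== PORT B =====
def QMOD_TABLE : List (String × String) :=
  [("w", "word"), ("v", "vector"), ("r", "rerank")]

def parse_qmod_str_alt (mode_str : String) : List String :=
  let s := PySem.Str.strip (PySem.Str.lower mode_str)
  let result :=
    QMOD_TABLE.foldl (fun acc p => if PySem.Str.isIn p.1 s then acc ++ [p.2] else acc) []
  if !result.contains "word" && !result.contains "vector" then QMOD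
  else result

-- ===== PRECONDITION & SPEC =====
def Spec_parse_qmod_str (mode_str : String) (out : List String) : Prop := out = parse_qmod_str_alt mode_str
instance (mode_str : String) (out : List String) : Decidable (Spec_parse_qmod_str mode_str out) := by unfold Spec_parse_qmod_str; infer_instance

-- ===== CLAIM (what is proved, stated in full; the proofs are below) =====
def Claim_equal_parse_qmod_str : Prop := ∀ (mode_str : String), Dom_parse_qmod_str mode_str → Spec_parse_qmod_str mode_str (parse_qmod_str mode_str)

-- ===== LEMMAS AND PROOFS =====

theorem get?_qmod_char_map (c : Char) :
    PySem.Dict.get? QMOD_CHAR_MAP c =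
      if 'w' = c then some "word"
      else if 'v' = c then some "vector"
      else if 'r' = c then some "rerank"
      else none := by
  have hmk : QMOD_CHAR_MAP =
      PySem.Dict.mk [('w', "word"), ('v', "vector"), ('r', "rerank")] := by rfl
  have h0 : (PySem.Dict.mk ([] : List (Char × String))).get? c = none := rfl
  rw [hmk, PySem.Dict.get?_mk_cons, PySem.Dict.get?_mk_cons, PySem.Dict.get?_mk_cons, h0]
  simp only [beq_iff_eq]

theorem mem_qmod_fold (L : List Char) (m : PySem.Set String) (x : String) :
    x ∈ L.foldl
        (fun m c =>
          match PySem.Dict.get? QMOD_CHAR_MAP c with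
          | some mode_name => PySem.Set.add m mode_name
          | none => m) m ↔
      x ∈ m ∨ ∃ c ∈ L, PySem.Dict.get? QMOD_CHAR_MAP c = some x := by
  induction L generalizing m with
  | nil => simp
  | cons c L ih =>
    simp only [List.foldl_cons, ih]
    cases h : PySem.Dict.get? QMOD_CHAR_MAP c with
    | none => simp [h]
    | some y =>
      simp only [List.mem_cons, PySem.Set.mem_add]
      constructor
      · rintro (⟨hm | rfl⟩ | ⟨d, hd, hg⟩)
        · tauto
        · exact Or.inr ⟨c, Or.inl rfl, h⟩
        · exact Or.inr ⟨d, Or.inr hd, hg⟩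
      · rintro (hm | ⟨d, rfl | hd, hg⟩)
        · tauto
        · rw [h] at hg; exact Or.inl (Or.inr (Option.some_inj.mp hg).symm)
        · exact Or.inr ⟨d, hd, hg⟩

theorem singleton_infix_iff {α : Type} (a : α) (l : List α) : [a] <:+: l ↔ a ∈ l := by
  constructor
  · intro h; exact h.mem (List.mem_singleton_self a)
  · intro h
    obtain ⟨s, t, rfl⟩ := List.append_of_mem h
    exact ⟨s, t, by simp⟩

theorem isIn_single (a : Char) (t s : String) (ht : t.toList = [a]) :
    PySem.Str.isIn t s = decide (a ∈ s.toList) := by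
  have h1 : PySem.Str.isIn t s = true ↔ a ∈ s.toList := by
    rw [PySem.Str.isIn_iff_infix, ht, singleton_infix_iff]
  by_cases h : a ∈ s.toList
  · simp only [h, decide_true]; exact h1.mpr h
  · simp only [h, decide_false]
    exact Bool.eq_false_iff.mpr (fun hc => h (h1.mp hc))

theorem contains_qmod_fold (s : String) (a : Char) (x : String)
    (hx : PySem.Dict.get? QMOD_CHAR_MAP a = some x)
    (hax : ∀ c, PySem.Dict.get? QMOD_CHAR_MAP c = some x → c = a) :
    PySem.Set.contains
      (s.toList.foldl
        (fun m c =>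
          match PySem.Dict.get? QMOD_CHAR_MAP c with
          | some mode_name => PySem.Set.add m mode_name
          | none => m) PySem.Set.empty) x = decide (a ∈ s.toList) := by
  have hmem : x ∈ (s.toList.foldl
        (fun m c =>
          match PySem.Dict.get? QMOD_CHAR_MAP c with
          | some mode_name => PySem.Set.add m mode_name
          | none => m) PySem.Set.empty) ↔ a ∈ s.toList := by
    rw [mem_qmod_fold]
    simp only [PySem.Set.empty, List.not_mem_nil, false_or]
    constructor
    · rintro ⟨c, hc, hg⟩; rwa [hax c hg] at hc
    · intro ha; exact ⟨a, ha, hx⟩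
  by_cases h : a ∈ s.toList
  · simp only [h, decide_true]
    simpa [PySem.Set.contains] using hmem.mpr h
  · simp only [h, decide_false]
    apply Bool.eq_false_iff.mpr
    intro hc
    exact h (hmem.mp (by simpa [PySem.Set.contains] using hc))

theorem contains_fold_w (s : String) :
    PySem.Set.contains
      (s.toList.foldl
        (fun m c =>
          match PySem.Dict.get? QMOD_CHAR_MAP c with
          | some mode_name => PySem.Set.add m mode_name
          | none => m) PySem.Set.empty) "word" = decide ('w' ∈ s.toList) :=
  contains_qmod_fold s 'w' "word" (by rw [get?_qmod_char_map]; decide)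
    (fun c hg => by
      rw [get?_qmod_char_map] at hg
      split_ifs at hg with h1 h2 h3
      · exact h1.symm
      · exact absurd (Option.some.inj hg) (by decide)
      · exact absurd (Option.some.inj hg) (by decide)
      )

theorem isIn_w (s : String) : PySem.Str.isIn "w" s = decide ('w' ∈ s.toList) :=
  isIn_single 'w' "w" s rfl

theorem contains_fold_v (s : String) :
    PySem.Set.contains
      (s.toList.foldl
        (fun m c =>
          match PySem.Dict.get? QMOD_CHAR_MAP c with
          | some mode_name => PySem.Set.add m mode_name
          | none => m) PySem.Set.empty) "vector" = decide ('v' ∈ s.toList) :=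
  contains_qmod_fold s 'v' "vector" (by rw [get?_qmod_char_map]; decide)
    (fun c hg => by
      rw [get?_qmod_char_map] at hg
      split_ifs at hg with h1 h2 h3
      · exact absurd (Option.some.inj hg) (by decide)
      · exact h2.symm
      · exact absurd (Option.some.inj hg) (by decide)
      )

theorem isIn_v (s : String) : PySem.Str.isIn "v" s = decide ('v' ∈ s.toList) :=
  isIn_single 'v' "v" s rfl

theorem contains_fold_r (s : String) :
    PySem.Set.contains
      (s.toList.foldl
        (fun m c =>
          match PySem.Dict.get? QMOD_CHAR_MAP c with
          | some mode_name => PySem.Set.add m mode_name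
          | none => m) PySem.Set.empty) "rerank" = decide ('r' ∈ s.toList) :=
  contains_qmod_fold s 'r' "rerank" (by rw [get?_qmod_char_map]; decide)
    (fun c hg => by
      rw [get?_qmod_char_map] at hg
      split_ifs at hg with h1 h2 h3
      · exact absurd (Option.some.inj hg) (by decide)
      · exact absurd (Option.some.inj hg) (by decide)
      · exact h3.symm
      )

theorem isIn_r (s : String) : PySem.Str.isIn "r" s = decide ('r' ∈ s.toList) :=
  isIn_single 'r' "r" s rfl

set_option maxHeartbeats 800000 in
theorem parse_qmod_str_spec : Claim_equal_parse_qmod_str := by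
  intro mode_str _
  unfold Spec_parse_qmod_str
  simp only [parse_qmod_str, parse_qmod_str_alt]
  generalize PySem.Str.strip (PySem.Str.lower mode_str) = t
  simp only [QMOD_TABLE, List.foldl_cons, List.foldl_nil, List.filter_cons, List.filter_nil,
    contains_fold_w, contains_fold_v, contains_fold_r, isIn_w, isIn_v, isIn_r]
  by_cases Hw : 'w' ∈ t.toList <;> by_cases Hv : 'v' ∈ t.toList <;> by_cases Hr : 'r' ∈ t.toList <;>
    simp [Hw, Hv, Hr, QMOD]

-- ===== VERDICT (by name: the statement is the Claim_ definition above) =====
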